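-- pv_equiv track=rewrite | github.com/stevezieglerva/nc-state-fair-ride-and-food-finder | create_page.py | get_sorted_unique_column_values
-- ===== SOURCE A (Python) =====
-- def get_sorted_unique_column_values(data, column_name):
-- 	unique_list = {}
-- 	for row in data:
-- 		col_val = row[column_name]
-- 		if col_val not in unique_list:
-- 			unique_list[col_val] = 1
-- 		else:
-- 			unique_list[col_val] = unique_list[col_val] + 1
-- 	sorted_unique_list = sorted(unique_list.keys())
-- 	return sorted_unique_list
-- ===== SOURCE B (Python) =====
-- def get_sorted_unique_column_values(data, column_name):
-- 	all_vals = sorted(row[column_name] for row in data)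
-- 	out = []
-- 	for v in all_vals:
-- 		if not out or out[-1] != v:
-- 			out.append(v)
-- 	return out
-- ===== Notes on version B (the rewrite author's own statement) =====
-- stated objective: alternative
-- what changed: Replaces A's hash-table (dict) collection of unique keys followed by a sort with sorting all column values first and a single linear scan that appends a value only when it differs from the last appended one (no hash set/dict at all).
import Mathlib
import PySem

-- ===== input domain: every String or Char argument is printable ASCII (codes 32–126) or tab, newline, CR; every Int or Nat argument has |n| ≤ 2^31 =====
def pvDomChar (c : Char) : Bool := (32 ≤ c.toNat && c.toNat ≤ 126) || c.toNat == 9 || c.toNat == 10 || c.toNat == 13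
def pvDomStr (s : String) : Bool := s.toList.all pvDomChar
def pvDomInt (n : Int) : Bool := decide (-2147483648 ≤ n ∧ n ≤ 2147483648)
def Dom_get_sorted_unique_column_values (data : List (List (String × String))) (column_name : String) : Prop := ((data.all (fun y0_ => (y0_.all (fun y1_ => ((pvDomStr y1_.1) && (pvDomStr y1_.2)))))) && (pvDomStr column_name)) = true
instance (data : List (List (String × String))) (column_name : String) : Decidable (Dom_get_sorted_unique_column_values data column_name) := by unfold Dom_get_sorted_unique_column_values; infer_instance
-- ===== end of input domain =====

-- One honest line: B sorts all column values first and dedupes adjacent duplicates in one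
-- scan, instead of A's dict-based uniqueness collection followed by a sort of the keys.

-- ===== PORT A =====
-- row[column_name]: Python dict lookup (first match); Pre_ excludes rows missing the key,
-- where Python raises KeyError (the .getD "" default is never reached inside Pre_).
def pvColVal (row : List (String × String)) (column_name : String) : String :=
  ((PySem.Dict.mk row).get? column_name).getD ""

def get_sorted_unique_column_values (data : List (List (String × String))) (column_name : String) : List String :=
  let unique_list : PySem.Dict String Int :=
    data.foldl (fun d row =>
      let col_val := pvColVal row column_name
      if d.contains col_val = false then d.insert col_val 1
      else d.insert col_val (d.getD col_val 0 + 1)) PySem.Dict.empty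
  PySem.List.sorted (PySem.Dict.keys unique_list) (fun x => x) false

-- ===== PORT B =====
def get_sorted_unique_column_values_alt (data : List (List (String × String))) (column_name : String) : List String :=
  let all_vals := PySem.List.sorted (data.map (fun row => pvColVal row column_name)) (fun x => x) false
  all_vals.foldl (fun out v => if out = [] ∨ out.getLast? ≠ some v then out ++ [v] else out) []

-- ===== PRECONDITION & SPEC =====
-- Pre_ excludes exactly the inputs where some row lacks column_name: there Python A (and B) raise KeyError.
def Pre_get_sorted_unique_column_values (data : List (List (String × String))) (column_name : String) : Prop :=
  ∀ row ∈ data, column_name ∈ row.map Prod.fst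
instance (data : List (List (String × String))) (column_name : String) : Decidable (Pre_get_sorted_unique_column_values data column_name) := by unfold Pre_get_sorted_unique_column_values; infer_instance

def pvWitness_get_sorted_unique_column_values : (List (List (String × String))) × String :=
  ([[("c", "x")], [("c", "a")], [("c", "x")]], "c")

def Spec_get_sorted_unique_column_values (data : List (List (String × String))) (column_name : String) (out : List String) : Prop := out = get_sorted_unique_column_values_alt data column_name
instance (data : List (List (String × String))) (column_name : String) (out : List String) : Decidable (Spec_get_sorted_unique_column_values data column_name out) := by unfold Spec_get_sorted_unique_column_values; infer_instance

-- ===== CLAIM (what is proved, stated in full; the proofs are below) =====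
def Claim_equal_get_sorted_unique_column_values : Prop := ∀ (data : List (List (String × String))) (column_name : String), Dom_get_sorted_unique_column_values data column_name → Pre_get_sorted_unique_column_values data column_name → Spec_get_sorted_unique_column_values data column_name (get_sorted_unique_column_values data column_name)

-- ===== LEMMAS AND PROOFS =====

-- A's dict loop registers every value at its own key, so its key list is set(vals) in first-occurrence order.
lemma keysA (data : List (List (String × String))) (column_name : String) :
    (data.foldl (fun d row =>
      if d.contains (pvColVal row column_name) = false then d.insert (pvColVal row column_name) 1
      else d.insert (pvColVal row column_name) (d.getD (pvColVal row column_name) 0 + 1))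
      (PySem.Dict.empty : PySem.Dict String Int)).keys
    = PySem.Set.ofList (data.map (fun row => pvColVal row column_name)) := by
  have hfold : (data.foldl (fun d row =>
      if d.contains (pvColVal row column_name) = false then d.insert (pvColVal row column_name) 1
      else d.insert (pvColVal row column_name) (d.getD (pvColVal row column_name) 0 + 1))
      (PySem.Dict.empty : PySem.Dict String Int))
    = data.foldl (fun d row => d.insert (pvColVal row column_name)
        (if d.contains (pvColVal row column_name) = false then 1
         else d.getD (pvColVal row column_name) 0 + 1)) PySem.Dict.empty := by
    apply List.foldl_ext
    intro d row _
    by_cases h : d.contains (pvColVal row column_name) = false <;> simp [h]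
  rw [hfold, PySem.Dict.keys_foldl_insert_key]
  simp [PySem.Dict.keys_empty, PySem.Set.update, PySem.Set.ofList_eq_foldl]

-- In a ≤-sorted list, every element is ≤ the last one.
lemma le_getLast_of_pairwise : ∀ (l : List String) (a x : String),
    l.Pairwise (· ≤ ·) → a ∈ l → l.getLast? = some x → a ≤ x := by
  intro l
  induction l with
  | nil => simp
  | cons b t ih =>
    intro a x hp ha hx
    cases t with
    | nil => simp at ha hx; simp [ha, hx]
    | cons c t' =>
      rw [List.getLast?_cons_cons] at hx
      rcases List.mem_cons.mp ha with h | h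
      · subst h
        have hxmem : x ∈ c :: t' := List.mem_of_getLast? hx
        exact List.rel_of_pairwise_cons hp hxmem
      · exact ih a x hp.of_cons h hx

-- B's scan invariant: starting from a strictly increasing acc whose elements bound s below,
-- the scan stays strictly increasing and collects exactly the elements of acc and s.
lemma scan_invariant : ∀ (s acc : List String),
    acc.Pairwise (· < ·) → s.Pairwise (· ≤ ·) → (∀ a ∈ acc, ∀ b ∈ s, a ≤ b) →
    (s.foldl (fun out v => if out = [] ∨ out.getLast? ≠ some v then out ++ [v] else out) acc).Pairwise (· < ·)
    ∧ (∀ x, x ∈ s.foldl (fun out v => if out = [] ∨ out.getLast? ≠ some v then out ++ [v] else out) acc ↔ x ∈ acc ∨ x ∈ s) := by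
  intro s
  induction s with
  | nil => intro acc h1 _ _; simpa using h1
  | cons v s' ih =>
    intro acc h1 h2 h3
    have hs' : s'.Pairwise (· ≤ ·) := h2.of_cons
    have hvle : ∀ b ∈ s', v ≤ b := fun b hb => List.rel_of_pairwise_cons h2 hb
    by_cases hc : acc = [] ∨ acc.getLast? ≠ some v
    · -- append v
      have hacc' : (acc ++ [v]).Pairwise (· < ·) := by
        rw [List.pairwise_append]
        refine ⟨h1, by simp, ?_⟩
        intro a ha b hb
        simp only [List.mem_singleton] at hb; subst hb
        have hle : a ≤ b := h3 a ha b (List.mem_cons_self ..)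
        rcases lt_or_eq_of_le hle with h | h
        · exact h
        · exfalso; subst h
          rcases hc with hnil | hlast
          · simp [hnil] at ha
          · obtain ⟨l, hl⟩ := Option.isSome_iff_exists.mp
              (List.getLast?_isSome.mpr (List.ne_nil_of_mem ha))
            have h1le : acc.Pairwise (· ≤ ·) := h1.imp le_of_lt
            have hal : a ≤ l := le_getLast_of_pairwise acc a l h1le ha hl
            have hlv : l ≤ a := h3 l (List.mem_of_getLast? hl) a (List.mem_cons_self ..)
            exact hlast (by rw [hl, le_antisymm hlv hal])
      have h3' : ∀ a ∈ acc ++ [v], ∀ b ∈ s', a ≤ b := by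
        intro a ha b hb
        rcases List.mem_append.mp ha with h | h
        · exact h3 a h b (List.mem_cons_of_mem _ hb)
        · simp only [List.mem_singleton] at h; subst h; exact hvle b hb
      simp only [List.foldl_cons, if_pos hc]
      obtain ⟨hp, hm⟩ := ih (acc ++ [v]) hacc' hs' h3'
      refine ⟨hp, fun x => ?_⟩
      rw [hm x]
      simp [List.mem_append, or_assoc]
    · -- skip: out[-1] == v already
      have hc2 : acc.getLast? = some v := by
        by_contra h
        exact hc (Or.inr h)
      have hv : v ∈ acc := List.mem_of_getLast? hc2
      simp only [List.foldl_cons, if_neg hc]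
      obtain ⟨hp, hm⟩ := ih acc h1 hs' (fun a ha b hb => h3 a ha b (List.mem_cons_of_mem _ hb))
      refine ⟨hp, fun x => ?_⟩
      rw [hm x]
      constructor
      · rintro (h | h)
        · exact Or.inl h
        · exact Or.inr (List.mem_cons_of_mem _ h)
      · rintro (h | h)
        · exact Or.inl h
        · rcases List.mem_cons.mp h with h | h
          · subst h; exact Or.inl hv
          · exact Or.inr h

-- ===== VERDICT (by name: the statement is the Claim_ definition above) =====
theorem get_sorted_unique_column_values_spec : Claim_equal_get_sorted_unique_column_values := by
  intro data column_name _ _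
  unfold Spec_get_sorted_unique_column_values
  simp only [get_sorted_unique_column_values, get_sorted_unique_column_values_alt]
  rw [keysA]
  have hsp : (PySem.List.sorted (data.map (fun row => pvColVal row column_name)) (fun x => x) false).Pairwise (· ≤ ·) :=
    PySem.List.sorted_pairwise _ (fun x => x)
  obtain ⟨hpw, hmem⟩ := scan_invariant
    (PySem.List.sorted (data.map (fun row => pvColVal row column_name)) (fun x => x) false) []
    (by simp) hsp (by simp)
  apply PySem.List.sorted_eq_of_perm_of_pairwise_lt
  · apply (List.perm_ext_iff_of_nodup (hpw.imp ne_of_lt) (PySem.Set.nodup_ofList _)).mpr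
    intro a
    rw [hmem a]
    simp [PySem.Set.mem_ofList, PySem.List.mem_sorted]
  · exact hpw
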